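-- pv_equiv track=rewrite | github.com/TheNitromeFan/baekjoon | 04492.py | amp
-- ===== SOURCE A (Python) =====
-- lights = [6, 2, 5, 5, 4, 5, 6, 3, 7, 6]
--
-- def amp(n):
--     if n == 0:
--         return 30
--     elif n < 0:
--         return 5 + amp(-n)
--     ret = 0
--     while n:
--         ret += 5 * lights[n % 10]
--         n //= 10
--     return ret
-- ===== SOURCE B (Python) =====
-- lights = [6, 2, 5, 5, 4, 5, 6, 3, 7, 6]
--
-- def amp(n):
--     total = 0
--     for c in str(n):
--         total += 5 if c == '-' else 5 * lights[int(c)]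
--     return total
-- ===== Notes on version B (the rewrite author's own statement) =====
-- stated objective: simpler
-- what changed: Replaces the zero special case, the recursion on negatives and the arithmetic digit-extraction while-loop by one uniform pass over the characters of str(n), mapping the minus sign to its segment cost and each digit character to its lights value times the per-segment cost.
import Mathlib
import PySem

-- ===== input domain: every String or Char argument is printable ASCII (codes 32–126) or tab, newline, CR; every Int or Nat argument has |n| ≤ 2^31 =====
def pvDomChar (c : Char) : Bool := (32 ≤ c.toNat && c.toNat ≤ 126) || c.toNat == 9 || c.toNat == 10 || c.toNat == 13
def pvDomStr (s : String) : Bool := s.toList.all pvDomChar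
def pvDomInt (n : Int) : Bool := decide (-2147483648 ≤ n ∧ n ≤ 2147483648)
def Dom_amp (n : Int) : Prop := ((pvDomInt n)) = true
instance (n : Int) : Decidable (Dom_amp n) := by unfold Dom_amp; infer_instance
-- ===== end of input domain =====

-- B collapses A's zero special case, negative recursion and digit-extraction loop
-- into one uniform pass over the characters of str(n) ('-' counts 5, digit d counts 5*lights[d]); objective: simpler.


-- ===== PORT A =====
def lightsA : List Int := [6, 2, 5, 5, 4, 5, 6, 3, 7, 6]

-- A's while loop (entered only with n > 0; the n ≤ 0 branch is a totality guard A never reaches)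
def ampLoop (n ret : Int) : Int :=
  if _h : n ≤ 0 then ret
  else ampLoop (PySem.Int.floordiv n 10)
               (ret + 5 * lightsA.getD (PySem.Int.mod n 10).toNat 0)
termination_by n.toNat
decreasing_by
  rw [PySem.Int.floordiv_eq_ediv_of_pos (by norm_num : (0:Int) < 10)]
  omega

def amp (n : Int) : Int :=
  if n = 0 then 30
  else if n < 0 then 5 + amp (-n)
  else ampLoop n 0
termination_by ((if n < 0 then 1 else 0) : Nat)
decreasing_by
  split_ifs with h1 <;> omega

-- ===== PORT B =====
def lightsB : List Int := [6, 2, 5, 5, 4, 5, 6, 3, 7, 6]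

-- segments of one character of str(n); Python's int(c) on a digit char is c.toNat - 48 (exact there)
def segChar (c : Char) : Int := if c = '-' then 5 else 5 * lightsB.getD (c.toNat - 48) 0

def amp_alt (n : Int) : Int :=
  (PySem.Int.toStr n).toList.foldl (fun acc c => acc + segChar c) 0

-- ===== PRECONDITION & SPEC =====
def Spec_amp (n : Int) (out : Int) : Prop := out = amp_alt n
instance (n : Int) (out : Int) : Decidable (Spec_amp n out) := by unfold Spec_amp; infer_instance

-- ===== CLAIM (what is proved, stated in full; the proofs are below) =====
def Claim_equal_amp : Prop := ∀ (n : Int), Dom_amp n → Spec_amp n (amp n)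

-- ===== LEMMAS AND PROOFS =====

-- total segment count of the decimal digits of a positive number
def digSum (n : Nat) : Int :=
  5 * lightsA.getD (n % 10) 0 + (if _h : n / 10 = 0 then 0 else digSum (n / 10))
termination_by n
decreasing_by omega

theorem segChar_digitChar : ∀ d : Nat, d < 10 → segChar (Nat.digitChar d) = 5 * lightsA.getD d 0 := by
  decide

theorem sum_toDigitsCore :
    ∀ (fuel n : Nat) (ds : List Char), n < fuel →
      ((Nat.toDigitsCore 10 fuel n ds).map segChar).sum
        = digSum n + (ds.map segChar).sum := by
  intro fuel
  induction fuel with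
  | zero => omega
  | succ f ih =>
    intro n ds h
    rw [Nat.toDigitsCore]
    by_cases h0 : n / 10 = 0
    · rw [if_pos h0]
      conv_rhs => rw [digSum]
      rw [dif_pos h0]
      simp [segChar_digitChar (n % 10) (Nat.mod_lt _ (by norm_num))]
    · rw [if_neg h0]
      rw [ih (n / 10) _ (by omega)]
      conv_rhs => rw [digSum]
      rw [dif_neg h0]
      simp [segChar_digitChar (n % 10) (Nat.mod_lt _ (by norm_num))]
      ring

theorem sum_toDigits (n : Nat) :
    ((Nat.toDigits 10 n).map segChar).sum = digSum n := by
  have := sum_toDigitsCore (n + 1) n [] (by omega)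
  simpa [Nat.toDigits] using this

theorem ampLoop_eq : ∀ (n : Nat), 0 < n → ∀ r : Int, ampLoop (n : Int) r = r + digSum n := by
  intro n
  induction n using Nat.strong_induction_on with
  | _ n ih =>
    intro hn r
    rw [ampLoop]
    rw [dif_neg (by exact_mod_cast by omega)]
    have hfd : PySem.Int.floordiv (n : Int) 10 = ((n / 10 : Nat) : Int) := by
      exact_mod_cast PySem.Int.floordiv_natCast n 10
    have hmd : PySem.Int.mod (n : Int) 10 = ((n % 10 : Nat) : Int) := by
      exact_mod_cast PySem.Int.mod_natCast n 10
    rw [hfd, hmd]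
    simp only [Int.toNat_natCast]
    by_cases h0 : n / 10 = 0
    · rw [h0]
      rw [ampLoop]
      rw [dif_pos (by norm_num)]
      conv_rhs => rw [digSum]
      rw [dif_pos h0]
      ring
    · rw [ih (n / 10) (by omega) (by omega)]
      conv_rhs => rw [digSum]
      rw [dif_neg h0]
      ring

theorem amp_alt_nonneg (n : Int) (h : 0 ≤ n) :
    amp_alt n = digSum n.toNat := by
  unfold amp_alt
  rw [PySem.Int.toStr]
  have hch : PySem.Int.toChars n = Nat.toDigits 10 n.toNat := by
    unfold PySem.Int.toChars
    rw [if_neg (by omega)]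
  simp [hch, PySem.List.foldl_add, sum_toDigits]

theorem amp_spec_aux : ∀ (n : Int), amp n = amp_alt n := by
  intro n
  by_cases h0 : n = 0
  · subst h0
    rw [amp]
    norm_num [amp_alt_nonneg 0 (by norm_num)]
    rw [digSum]
    decide
  · by_cases hneg : n < 0
    · rw [amp]
      rw [if_neg h0, if_pos hneg]
      have hpos : (0:Int) < -n := by omega
      rw [amp]
      rw [if_neg (by omega), if_neg (by omega)]
      have hcast : (-n) = (((-n).toNat : Nat) : Int) := by omega
      rw [hcast, ampLoop_eq (-n).toNat (by omega) 0]
      -- B side: str(n) = '-' :: digits of |n|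
      unfold amp_alt
      rw [PySem.Int.toStr]
      have hch : PySem.Int.toChars n = '-' :: Nat.toDigits 10 n.natAbs := by
        unfold PySem.Int.toChars
        rw [if_pos hneg]
      simp [hch, PySem.List.foldl_add, sum_toDigits]
      have h1 : (-n).toNat = n.natAbs := by omega
      rw [h1]
      have h2 : segChar '-' = 5 := by decide
      omega
    · rw [amp]
      rw [if_neg h0, if_neg hneg]
      have hcast : n = ((n.toNat : Nat) : Int) := by omega
      rw [amp_alt_nonneg n (by omega)]
      conv_lhs => rw [hcast]
      rw [ampLoop_eq n.toNat (by omega) 0]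
      simp

-- ===== VERDICT (by name: the statement is the Claim_ definition above) =====
theorem amp_spec : Claim_equal_amp := by
  intro n _
  unfold Spec_amp
  exact amp_spec_aux n
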